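-- pv_equiv track=rewrite | github.com/pypi-data/pypi-mirror-369 | packages/swe-ai-agent/swe_ai_agent-2.0.0.tar.gz/swe_ai_agent-2.0.0/swe_agent/tools/editing_tools.py | _add_function_docstrings
-- ===== SOURCE A (Python) =====
-- from typing import Dict, List, Optional, Tuple
--
-- def _add_function_docstrings(lines: List[str]) -> str:
--     """Add docstrings to functions that don't have them."""
--     edits = []
--     i = 0
--
--     while i < len(lines):
--         line = lines[i]
--         if line.strip().startswith('def '):
--             # Check if next non-empty line is a docstring
--             j = i + 1
--             while j < len(lines) and not lines[j].strip():
--                 j += 1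
--
--             if j < len(lines) and not lines[j].strip().startswith('"""') and not lines[j].strip().startswith("'''"):
--                 # Add docstring
--                 indent = ' ' * (len(line) - len(line.lstrip()) + 4)
--                 docstring = f'{indent}"""Function docstring added by SWE Agent."""'
--                 lines.insert(i + 1, docstring)
--                 edits.append(f"Added docstring to function at line {i+1}")
--                 i += 1  # Skip the inserted line
--         i += 1
--
--     return f"Added {len(edits)} docstrings"
-- ===== SOURCE B (Python) =====
-- from typing import List
--
-- def _add_function_docstrings(lines: List[str]) -> str:
--     """Add docstrings to functions that don't have them."""
--     count = 0
--     nxt = None  # stripped text of the nearest non-blank line below the current one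
--     for i in range(len(lines) - 1, -1, -1):
--         s = lines[i].strip()
--         if (s.startswith('def ') and nxt is not None
--                 and not nxt.startswith('"""') and not nxt.startswith("'''")):
--             indent = ' ' * (len(lines[i]) - len(lines[i].lstrip()) + 4)
--             lines.insert(i + 1, indent + '"""Function docstring added by SWE Agent."""')
--             count += 1
--         if s:
--             nxt = s
--     return f"Added {count} docstrings"
-- ===== Notes on version B (the rewrite author's own statement) =====
-- stated objective: alternative
-- what changed: Replaces A's forward mutate-while-you-scan loop with its nested look-ahead scan for the next non-empty line by a single reverse pass that carries the stripped nearest non-blank line below as an accumulator, so the inner while loop disappears and insertions at descending positions never invalidate indices.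
import Mathlib
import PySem

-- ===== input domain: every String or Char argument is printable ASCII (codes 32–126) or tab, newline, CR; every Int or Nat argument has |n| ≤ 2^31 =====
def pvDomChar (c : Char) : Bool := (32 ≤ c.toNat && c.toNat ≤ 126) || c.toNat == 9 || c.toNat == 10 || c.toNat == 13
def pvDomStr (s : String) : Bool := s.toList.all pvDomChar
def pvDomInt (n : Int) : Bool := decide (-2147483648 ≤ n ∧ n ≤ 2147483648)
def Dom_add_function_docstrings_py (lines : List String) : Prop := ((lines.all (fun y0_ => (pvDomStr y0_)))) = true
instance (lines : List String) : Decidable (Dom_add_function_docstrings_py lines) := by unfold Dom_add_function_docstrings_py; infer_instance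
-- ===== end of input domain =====

-- B replaces A's forward mutate-while-scanning loop (with its nested look-ahead for the next
-- non-empty line) by ONE reverse pass that carries the stripped nearest non-blank line below as
-- an accumulator (objective: alternative decomposition). Both Pythons mutate `lines` in place
-- identically; the equivalence proved here is about the RETURN value (the ports return only the
-- string).

-- ===== PORT A =====
-- `line.strip().startswith('def ')`
def pvIsDef (line : String) : Bool :=
  PySem.Str.startswith (PySem.Str.strip line) "def "

-- `not s.startswith('"""') and not s.startswith("'''")` applied to an already-stripped string
def pvNoDoc (s : String) : Bool :=
  !PySem.Str.startswith s "\"\"\"" && !PySem.Str.startswith s "'''"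

-- A's inner `while j < len(lines) and not lines[j].strip(): j += 1`
def pvFindJ (lines : List String) (j : Nat) : Nat :=
  if h : j < lines.length then
    if PySem.Str.strip lines[j] == "" then pvFindJ lines (j + 1) else j
  else j
termination_by lines.length - j

-- `' ' * (len(line) - len(line.lstrip()) + 4)` followed by the f-string docstring
def pvMkDoc (line : String) : String :=
  String.ofList (List.replicate (PySem.Str.len line - PySem.Str.len (PySem.Str.lstrip line) + 4).toNat ' ')
    ++ "\"\"\"Function docstring added by SWE Agent.\"\"\""

-- A's while loop: index i over the list being mutated by `lines.insert(i + 1, docstring)`,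
-- then `i += 1` to skip the inserted line, counting the edits list by its length
def pvLoopA (lines : List String) (i : Nat) (edits : Nat) : Nat :=
  if h : i < lines.length then
    if pvIsDef lines[i] then
      let j := pvFindJ lines (i + 1)
      if decide (j < lines.length) && pvNoDoc (PySem.Str.strip (lines.getD j "")) then
        pvLoopA (PySem.List.insert lines ((i : Int) + 1) (pvMkDoc lines[i])) (i + 2) (edits + 1)
      else pvLoopA lines (i + 1) edits
    else pvLoopA lines (i + 1) edits
  else edits
termination_by lines.length + 1 - i
decreasing_by
  · simp [PySem.List.length_insert]; omega
  · omega
  · omega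

def add_function_docstrings_py (lines : List String) : String :=
  "Added " ++ PySem.Int.toStr (pvLoopA lines 0 0 : Int) ++ " docstrings"

-- ===== PORT B =====
-- B's `for i in range(len(lines) - 1, -1, -1)` loop as structural recursion over the list: the
-- recursive call processes the tail (= all lines below) first and returns (count, nxt) where
-- nxt is the stripped nearest non-blank line below, exactly B's accumulator.  B's
-- `lines.insert(i + 1, …)` only touches indices > i, so the lines B later reads (indices < i)
-- and the returned string are those of the original list; the mutation is not modelled here.
def pvLoopB : List String → Nat × Option String
  | [] => (0, none)
  | line :: below =>
    let st := pvLoopB below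
    let s := PySem.Str.strip line
    let cnt :=
      if PySem.Str.startswith s "def " &&
          (match st.2 with
           | some nxt => !PySem.Str.startswith nxt "\"\"\"" && !PySem.Str.startswith nxt "'''"
           | none => false) then
        st.1 + 1
      else st.1
    (cnt, if s == "" then st.2 else some s)

def add_function_docstrings_py_alt (lines : List String) : String :=
  "Added " ++ PySem.Int.toStr ((pvLoopB lines).1 : Int) ++ " docstrings"

-- ===== PRECONDITION & SPEC =====
def Spec_add_function_docstrings_py (lines : List String) (out : String) : Prop := out = add_function_docstrings_py_alt lines
instance (lines : List String) (out : String) : Decidable (Spec_add_function_docstrings_py lines out) := by unfold Spec_add_function_docstrings_py; infer_instance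

-- ===== CLAIM (what is proved, stated in full; the proofs are below) =====
def Claim_equal_add_function_docstrings_py : Prop := ∀ (lines : List String), Dom_add_function_docstrings_py lines → Spec_add_function_docstrings_py lines (add_function_docstrings_py lines)

-- ===== LEMMAS AND PROOFS =====

-- `pvHit t` = the first non-blank line of t exists and is not a docstring opener
def pvHit (t : List String) : Bool :=
  match (t.dropWhile fun s => PySem.Str.strip s == "").head? with
  | some s => pvNoDoc (PySem.Str.strip s)
  | none => false

-- the common count both loops compute, as structural recursion on the suffix
def pvCnt : List String → Nat
  | [] => 0
  | l :: t => (if pvIsDef l && pvHit t then 1 else 0) + pvCnt t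

theorem pvFindJ_drop (lines : List String) (j : Nat) :
    lines.drop (pvFindJ lines j) = (lines.drop j).dropWhile (fun s => PySem.Str.strip s == "") := by
  induction hn : lines.length - j using Nat.strong_induction_on generalizing j with
  | _ n ih =>
    rw [pvFindJ]
    by_cases h : j < lines.length
    · rw [List.drop_eq_getElem_cons h]
      by_cases hb : PySem.Str.strip lines[j] == ""
      · simp only [h, hb, dif_pos, if_pos, List.dropWhile_cons_of_pos]
        exact ih (lines.length - (j+1)) (by omega) (j+1) rfl
      · simp only [h, hb, dif_pos, if_neg, Bool.not_eq_true]
        rw [List.dropWhile_cons_of_neg (by simpa using hb), ← List.drop_eq_getElem_cons h]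
    · simp [h, List.drop_eq_nil_of_le (show lines.length ≤ j by omega)]

-- the port-A guard (zeta-reduced) equals pvHit on the suffix
theorem pvCond_eq (lines : List String) (i : Nat) :
    (decide (pvFindJ lines (i + 1) < lines.length) &&
      pvNoDoc (PySem.Str.strip (lines.getD (pvFindJ lines (i + 1)) ""))) =
      pvHit (lines.drop (i + 1)) := by
  have hD := pvFindJ_drop lines (i + 1)
  unfold pvHit
  rw [← hD]
  by_cases h : pvFindJ lines (i + 1) < lines.length
  · rw [List.head?_drop]
    simp [h, List.getD_eq_getElem?_getD]
  · rw [List.drop_eq_nil_of_le (by omega)]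
    simp [h]

theorem pvInsert_drop (lines : List String) (i : Nat) (v : String) (h : i < lines.length) :
    (PySem.List.insert lines ((i : Int) + 1) v).drop (i + 2) = lines.drop (i + 1) := by
  have h1 : ((i : Int) + 1) = ((i + 1 : Nat) : Int) := by push_cast; ring
  rw [h1, PySem.List.insert_natCast lines (i + 1) v (by omega)]
  rw [show i + 2 = (lines.take (i + 1)).length + 1 by simp; omega, List.drop_append]
  simp

theorem pvLoopA_eq (n : Nat) : ∀ (lines : List String) (i edits : Nat), lines.length ≤ n + i →
    pvLoopA lines i edits = edits + pvCnt (lines.drop i) := by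
  induction n with
  | zero =>
    intro lines i edits hle
    rw [pvLoopA]
    have h : ¬ i < lines.length := by omega
    rw [List.drop_eq_nil_of_le (by omega)]
    simp [h, pvCnt]
  | succ n ih =>
    intro lines i edits hle
    rw [pvLoopA]
    by_cases h : i < lines.length
    · rw [List.drop_eq_getElem_cons h]
      simp only [dif_pos h, pvCnt, pvCond_eq]
      by_cases hd : pvIsDef lines[i]
      · by_cases hcond : pvHit (lines.drop (i + 1))
        · simp only [hd, hcond, Bool.and_self, if_pos]
          rw [ih _ _ _ (by rw [PySem.List.length_insert]; omega), pvInsert_drop lines i _ h]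
          omega
        · simp [hd, hcond]
          rw [ih _ _ _ (by omega)]
      · simp [hd]
        rw [ih _ _ _ (by omega)]
    · rw [List.drop_eq_nil_of_le (by omega)]
      simp [h, pvCnt]

-- pvLoopB's accumulator is the stripped first non-blank line of the suffix
theorem pvLoopB_snd (t : List String) :
    (pvLoopB t).2 = ((t.dropWhile fun s => PySem.Str.strip s == "").head?).map PySem.Str.strip := by
  induction t with
  | nil => simp [pvLoopB]
  | cons l t ih =>
    by_cases hb : PySem.Str.strip l == ""
    · rw [List.dropWhile_cons_of_pos (by simpa using hb)]
      simp [pvLoopB, hb, ih]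
    · rw [List.dropWhile_cons_of_neg (by simpa using hb)]
      simp [pvLoopB, hb]

theorem pvLoopB_fst (t : List String) : (pvLoopB t).1 = pvCnt t := by
  induction t with
  | nil => simp [pvLoopB, pvCnt]
  | cons l t ih =>
    have hg : (match (pvLoopB t).2 with
        | some nxt => !PySem.Str.startswith nxt "\"\"\"" && !PySem.Str.startswith nxt "'''"
        | none => false) = pvHit t := by
      rw [pvLoopB_snd]
      unfold pvHit
      cases (t.dropWhile fun s => PySem.Str.strip s == "").head? with
      | none => rfl
      | some s => simp [pvNoDoc]
    simp only [pvLoopB, pvCnt, hg, ← ih, pvIsDef]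
    split <;> omega

-- ===== VERDICT (by name: the statement is the Claim_ definition above) =====
theorem add_function_docstrings_py_spec : Claim_equal_add_function_docstrings_py := by
  intro lines _
  unfold Spec_add_function_docstrings_py add_function_docstrings_py add_function_docstrings_py_alt
  rw [pvLoopB_fst, pvLoopA_eq lines.length lines 0 0 (by omega)]
  simp
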